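-- pv_equiv track=rewrite | github.com/Dementophobia/advent-of-code-2020 | 2020_10_p2.py | analyze_sequences
-- ===== SOURCE A (Python) =====
-- def analyze_sequences(adapters):
--     sequences = [1]
--
--     for index in range(len(adapters)-1):
--         if adapters[index + 1] - adapters[index] == 1:
--             sequences[-1] += 1
--         elif adapters[index + 1] - adapters[index] == 3:
--             sequences.append(1)
--
--     return sequences
-- ===== SOURCE B (Python) =====
-- def analyze_sequences(adapters):
--     diffs = [b - a for a, b in zip(adapters, adapters[1:])]
--     segments = [[]]
--     for d in diffs:
--         if d == 3:
--             segments.append([])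
--         else:
--             segments[-1].append(d)
--     return [1 + seg.count(1) for seg in segments]
-- ===== Notes on version B (the rewrite author's own statement) =====
-- stated objective: alternative
-- what changed: B builds the consecutive-difference list once, splits it into segments at each diff==3 (delimiter), and returns 1 + (count of diff==1) per segment, replacing A's single pass that mutates the last run counter in place.
import Mathlib
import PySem

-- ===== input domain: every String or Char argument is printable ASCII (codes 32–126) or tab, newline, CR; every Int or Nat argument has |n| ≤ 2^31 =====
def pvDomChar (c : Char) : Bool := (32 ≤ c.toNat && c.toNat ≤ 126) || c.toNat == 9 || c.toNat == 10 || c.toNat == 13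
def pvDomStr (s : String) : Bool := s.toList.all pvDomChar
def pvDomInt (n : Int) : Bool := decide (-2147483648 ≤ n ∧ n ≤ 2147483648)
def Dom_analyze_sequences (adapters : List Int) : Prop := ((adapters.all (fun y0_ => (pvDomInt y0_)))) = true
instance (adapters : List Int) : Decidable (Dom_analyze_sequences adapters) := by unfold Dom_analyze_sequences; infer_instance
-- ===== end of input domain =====

-- B re-decomposes A's single accumulating pass into diffs → split-on-3 segments → per-segment 1+count(1); same O(n) cost, different structure (objective: alternative).

-- ===== PORT A =====
-- sequences[-1] += 1 : increment the last element of the list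
def incLast : List Int → List Int
  | [] => []
  | [x] => [x + 1]
  | x :: xs => x :: incLast xs

def analyze_sequences (adapters : List Int) : List Int :=
  (PySem.List.pyRange 0 ((adapters.length : Int) - 1) 1).foldl
    (fun sequences index =>
      if PySem.List.pyGetD adapters (index + 1) 0 - PySem.List.pyGetD adapters index 0 = 1 then
        incLast sequences
      else if PySem.List.pyGetD adapters (index + 1) 0 - PySem.List.pyGetD adapters index 0 = 3 then
        sequences ++ [1]
      else sequences) [1]

-- ===== PORT B =====
-- segments[-1].append(d) : append d to the last segment
def appendLast (d : Int) : List (List Int) → List (List Int)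
  | [] => []
  | [s] => [s ++ [d]]
  | s :: ss => s :: appendLast d ss

def analyze_sequences_alt (adapters : List Int) : List Int :=
  let diffs := (adapters.zip (PySem.List.slice adapters (some 1) none)).map
    (fun p => p.2 - p.1)
  let segments := diffs.foldl
    (fun segs d => if d = 3 then segs ++ [[]] else appendLast d segs) [[]]
  segments.map (fun seg => 1 + (PySem.List.count seg 1 : Int))

-- ===== PRECONDITION & SPEC =====
def Spec_analyze_sequences (adapters : List Int) (out : List Int) : Prop := out = analyze_sequences_alt adapters
instance (adapters : List Int) (out : List Int) : Decidable (Spec_analyze_sequences adapters out) := by unfold Spec_analyze_sequences; infer_instance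

-- ===== CLAIM (what is proved, stated in full; the proofs are below) =====
def Claim_equal_analyze_sequences : Prop := ∀ (adapters : List Int), Dom_analyze_sequences adapters → Spec_analyze_sequences adapters (analyze_sequences adapters)

-- ===== LEMMAS AND PROOFS =====

-- the common step on a difference value, A's side
def stepA (sequences : List Int) (d : Int) : List Int :=
  if d = 1 then incLast sequences else if d = 3 then sequences ++ [1] else sequences

-- per-segment value
def segVal (seg : List Int) : Int := 1 + (PySem.List.count seg 1 : Int)

lemma map_appendLast (d : Int) : ∀ segs : List (List Int),
    (appendLast d segs).map segVal = if d = 1 then incLast (segs.map segVal) else segs.map segVal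
  | [] => by simp [appendLast, incLast]
  | [s] => by
      by_cases h : d = 1
      · simp [appendLast, incLast, segVal, PySem.List.count_eq, h]
        ring
      · simp [appendLast, incLast, segVal, PySem.List.count_eq, h]
  | s :: t :: ts => by
      have ih := map_appendLast d (t :: ts)
      by_cases h : d = 1 <;> simp [appendLast, incLast, h] at ih ⊢ <;> exact ih

lemma fold_agree : ∀ (ds : List Int) (segs : List (List Int)),
    (ds.foldl (fun segs d => if d = 3 then segs ++ [[]] else appendLast d segs) segs).map segVal
      = ds.foldl stepA (segs.map segVal)
  | [], segs => rfl
  | d :: ds, segs => by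
      simp only [List.foldl_cons]
      by_cases h3 : d = 3
      · rw [if_pos h3, fold_agree ds]
        have h : (segs ++ [[]]).map segVal = stepA (segs.map segVal) d := by
          simp [stepA, segVal, h3]
        rw [h]
      · rw [if_neg h3, fold_agree ds, map_appendLast]
        have h : (if d = 1 then incLast (segs.map segVal) else segs.map segVal)
            = stepA (segs.map segVal) d := by
          simp [stepA, h3]
        rw [h]

-- A's indexed fold equals the structural fold over the consecutive differences
lemma A_eq_fold (adapters : List Int) :
    analyze_sequences adapters
      = (List.zipWith (fun a b => b - a) adapters adapters.tail).foldl stepA [1] := by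
  unfold analyze_sequences
  cases adapters with
  | nil => simp [PySem.List.pyRange_one_eq_nil]
  | cons a rest =>
    set xs := a :: rest with hxs
    set zs := List.zipWith (fun a b => b - a) xs xs.tail with hzs
    have hlen : (zs.length : Int) = (xs.length : Int) - 1 := by
      simp [hzs, hxs]
    have hcongr : ∀ seqs : List Int, ∀ i ∈ PySem.List.pyRange 0 ((xs.length : Int) - 1) 1,
        (if PySem.List.pyGetD xs (i + 1) 0 - PySem.List.pyGetD xs i 0 = 1 then
          incLast seqs
        else if PySem.List.pyGetD xs (i + 1) 0 - PySem.List.pyGetD xs i 0 = 3 then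
          seqs ++ [1]
        else seqs)
        = stepA seqs (PySem.List.pyGetD zs i 0) := by
      intro seqs i hi
      rw [PySem.List.mem_pyRange_one] at hi
      have hi0 : 0 ≤ i := hi.1
      have hiu : i < (xs.length : Int) - 1 := hi.2
      have hzl : i < (zs.length : Int) := by omega
      have h1 : PySem.List.pyGetD zs i 0 = zs[i.toNat]'(by omega) :=
        PySem.List.pyGetD_eq_getElem zs 0 hi0 hzl
      have h2 : PySem.List.pyGetD xs i 0 = xs[i.toNat]'(by omega) :=
        PySem.List.pyGetD_eq_getElem xs 0 hi0 (by omega)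
      have h3 : PySem.List.pyGetD xs (i + 1) 0 = xs[(i + 1).toNat]'(by omega) :=
        PySem.List.pyGetD_eq_getElem xs 0 (by omega) (by omega)
      have hn : (i + 1).toNat = i.toNat + 1 := by omega
      have hz : zs[i.toNat]'(by omega) = xs[i.toNat + 1]'(by omega) - xs[i.toNat]'(by omega) := by
        simp [hzs, List.getElem_zipWith, List.getElem_tail]
      rw [h1, h2, h3, hz, stepA]
      simp [hn]
    rw [PySem.List.foldl_congr_mem _ _
          (fun seqs i => stepA seqs (PySem.List.pyGetD zs i 0)) _ hcongr]
    rw [← hlen]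
    exact PySem.List.foldl_pyRange_zero_pyGetD' zs 0 stepA [1]

lemma zip_map_diffs (xs : List Int) :
    (xs.zip xs.tail).map (fun p => p.2 - p.1)
      = List.zipWith (fun a b => b - a) xs xs.tail := by
  simpa [Function.uncurry] using
    (List.map_uncurry_zip_eq_zipWith (f := fun a b => b - a) (l := xs) (l' := xs.tail))

theorem analyze_sequences_spec : Claim_equal_analyze_sequences := by
  intro adapters _
  show analyze_sequences adapters = analyze_sequences_alt adapters
  rw [A_eq_fold]
  unfold analyze_sequences_alt
  simp only [PySem.List.slice_from_one, zip_map_diffs]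
  have := (fold_agree (List.zipWith (fun a b => b - a) adapters adapters.tail) [[]]).symm
  simpa [segVal] using this
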